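-- pv_equiv track=rewrite | github.com/Marwan-Gama/OJT-Siraj | Week-5/test.py | tilingRectangle
-- ===== SOURCE A (Python) =====
-- def tilingRectangle(n, m):
--     squares = []
--     if n == m:
--         squares.append((m, m))
--         return squares
--
--     while n > 0 and m > 0:
--         if n > m:
--             n -= m
--             squares.append((m, m))
--         else:
--             m -= n
--             squares.append((n, n))
--
--     return squares
-- ===== SOURCE B (Python) =====
-- def tilingRectangle(n, m):
--     squares = []
--     if n == m:
--         squares.append((m, m))
--         return squares
--     while n > 0 and m > 0:
--         if n > m:
--             q, n = divmod(n, m)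
--             squares.extend([(m, m)] * q)
--         else:
--             q, m = divmod(m, n)
--             squares.extend([(n, n)] * q)
--     return squares
-- ===== Notes on version B (the rewrite author's own statement) =====
-- stated objective: faster
-- what changed: Replaces the one-square-per-iteration subtraction loop with a Euclidean divmod loop that emits each batch of equal squares with a single division step.
import Mathlib
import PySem

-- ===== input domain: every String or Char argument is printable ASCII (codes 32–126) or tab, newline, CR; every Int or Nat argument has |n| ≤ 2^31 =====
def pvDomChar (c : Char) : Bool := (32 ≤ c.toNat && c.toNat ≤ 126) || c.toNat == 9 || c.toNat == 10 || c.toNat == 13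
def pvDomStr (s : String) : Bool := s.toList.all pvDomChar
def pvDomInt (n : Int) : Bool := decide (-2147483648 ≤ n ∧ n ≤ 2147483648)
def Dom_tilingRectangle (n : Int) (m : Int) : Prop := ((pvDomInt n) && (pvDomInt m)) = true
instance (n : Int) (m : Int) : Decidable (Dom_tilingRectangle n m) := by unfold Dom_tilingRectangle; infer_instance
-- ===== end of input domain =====

-- B replaces A's one-square-per-iteration subtraction loop with a Euclidean divmod loop
-- that emits each batch of equal squares with a single division step (objective: faster).

-- ===== PORT A =====
-- A's while loop: subtract the smaller side, append one square per iteration.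
def tilingLoopA (n m : Int) : List (Int × Int) :=
  if n > 0 ∧ m > 0 then
    if n > m then (m, m) :: tilingLoopA (n - m) m
    else (n, n) :: tilingLoopA n (m - n)
  else []
termination_by (n + m).toNat
decreasing_by all_goals omega

def tilingRectangle (n : Int) (m : Int) : List (Int × Int) :=
  if n = m then [(m, m)] else tilingLoopA n m

-- ===== PORT B =====
-- B's while loop: divmod by the smaller side, append a whole batch at once.
def tilingLoopB (n m : Int) : List (Int × Int) :=
  if h : n > 0 ∧ m > 0 then
    if n > m then
      List.replicate (PySem.Int.floordiv n m).toNat (m, m) ++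
        tilingLoopB (PySem.Int.mod n m) m
    else
      List.replicate (PySem.Int.floordiv m n).toNat (n, n) ++
        tilingLoopB n (PySem.Int.mod m n)
  else []
termination_by (n + m).toNat
decreasing_by
  · have := Int.emod_lt_of_pos n (b := m) h.2
    have := Int.emod_nonneg n (by omega : m ≠ 0)
    simp only [PySem.Int.mod_eq_emod_of_pos h.2]; omega
  · have := Int.emod_lt_of_pos m (b := n) h.1
    have := Int.emod_nonneg m (by omega : n ≠ 0)
    simp only [PySem.Int.mod_eq_emod_of_pos h.1]; omega

def tilingRectangle_alt (n : Int) (m : Int) : List (Int × Int) :=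
  if n = m then [(m, m)] else tilingLoopB n m

-- ===== PRECONDITION & SPEC =====
def Spec_tilingRectangle (n : Int) (m : Int) (out : List (Int × Int)) : Prop := out = tilingRectangle_alt n m
instance (n : Int) (m : Int) (out : List (Int × Int)) : Decidable (Spec_tilingRectangle n m out) := by unfold Spec_tilingRectangle; infer_instance

-- ===== CLAIM (what is proved, stated in full; the proofs are below) =====
def Claim_equal_tilingRectangle : Prop := ∀ (n : Int) (m : Int), Dom_tilingRectangle n m → Spec_tilingRectangle n m (tilingRectangle n m)

-- ===== LEMMAS AND PROOFS =====

-- A's loop stops as soon as a side is ≤ 0.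
theorem tilingLoopA_stop (n m : Int) (h : ¬ (n > 0 ∧ m > 0)) : tilingLoopA n m = [] := by
  rw [tilingLoopA]; simp [h]

-- One division step of B equals a batch of subtraction steps of A (n > m side).
theorem tilingLoopA_batch_left (n m : Int) (hm : 0 < m) (hnm : m < n) :
    tilingLoopA n m = List.replicate (n / m).toNat (m, m) ++ tilingLoopA (n % m) m := by
  have hrec : tilingLoopA n m = (m, m) :: tilingLoopA (n - m) m := by
    rw [tilingLoopA, if_pos (by omega : n > 0 ∧ m > 0), if_pos hnm]
  by_cases hbig : m < n - m
  · have ih := tilingLoopA_batch_left (n - m) m hm hbig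
    have hdiv : (n - m) / m = n / m - 1 := by
      have he : (n + (-1) * m) / m = n / m + (-1) :=
        Int.add_mul_ediv_right n (-1) (by omega : m ≠ 0)
      have : n - m = n + (-1) * m := by ring
      rw [this, he]; ring
    have hmod : (n - m) % m = n % m := by
      simp
    have hq : 1 ≤ n / m := by
      have h1 := Int.ediv_le_ediv hm (show m ≤ n by omega)
      rw [Int.ediv_self (by omega : m ≠ 0)] at h1
      exact h1
    rw [hrec, ih, hdiv, hmod]
    have : (n / m).toNat = ((n / m - 1).toNat) + 1 := by omega
    rw [this, List.replicate_succ]; simp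
  · -- last batch: 0 < n - m ≤ m
    have hsub : 0 < n - m := by omega
    by_cases heq : n - m = m
    · -- n = 2m: the remaining m×m rectangle is exactly one square, quotient 2, remainder 0
      have hdiv : n / m = 2 := by
        rw [show n = 2 * m by omega, Int.mul_ediv_cancel _ (by omega)]
      have hmod : n % m = 0 := by
        rw [show n = 2 * m by omega]; simp [Int.mul_emod_left]
      have hmm : tilingLoopA m m = [(m, m)] := by
        rw [tilingLoopA]
        simp [hm, tilingLoopA_stop m 0 (by omega)]
      rw [hrec, heq, hmm, hdiv, hmod, tilingLoopA_stop 0 m (by omega)]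
      simp [List.replicate]
    · have hlt : n - m < m := by omega
      have hdiv : n / m = 1 := by
        rw [← PySem.Int.floordiv_eq_ediv_of_pos hm,
          PySem.Int.floordiv_eq_iff_of_pos hm]
        omega
      have hmod : n % m = n - m := by
        have he := Int.mul_ediv_add_emod n m
        rw [hdiv] at he; omega
      rw [hrec, hdiv, hmod]; simp
termination_by n.toNat
decreasing_by omega

-- One division step of B equals a batch of subtraction steps of A (n ≤ m side).
theorem tilingLoopA_batch_right (n m : Int) (hn : 0 < n) (hnm : n ≤ m) :
    tilingLoopA n m = List.replicate (m / n).toNat (n, n) ++ tilingLoopA n (m % n) := by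
  have hrec : tilingLoopA n m = (n, n) :: tilingLoopA n (m - n) := by
    rw [tilingLoopA, if_pos (by omega : n > 0 ∧ m > 0), if_neg (by omega : ¬ n > m)]
  by_cases hbig : n ≤ m - n
  · have ih := tilingLoopA_batch_right n (m - n) hn hbig
    have hdiv : (m - n) / n = m / n - 1 := by
      have he : (m + (-1) * n) / n = m / n + (-1) :=
        Int.add_mul_ediv_right m (-1) (by omega : n ≠ 0)
      have : m - n = m + (-1) * n := by ring
      rw [this, he]; ring
    have hmod : (m - n) % n = m % n := by
      simp
    have hq : 1 ≤ m / n := by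
      have h1 := Int.ediv_le_ediv hn hnm
      rw [Int.ediv_self (by omega : n ≠ 0)] at h1
      exact h1
    rw [hrec, ih, hdiv, hmod]
    have : (m / n).toNat = ((m / n - 1).toNat) + 1 := by omega
    rw [this, List.replicate_succ]; simp
  · have hlt : m - n < n := by omega
    have hdiv : m / n = 1 := by
      rw [← PySem.Int.floordiv_eq_ediv_of_pos hn,
        PySem.Int.floordiv_eq_iff_of_pos hn]
      omega
    have hmod : m % n = m - n := by
      have he := Int.mul_ediv_add_emod m n
      rw [hdiv] at he; omega
    rw [hrec, hdiv, hmod]; simp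
termination_by m.toNat
decreasing_by omega

-- The two loops agree everywhere.
theorem tilingLoop_eq (n m : Int) : tilingLoopA n m = tilingLoopB n m := by
  by_cases h : n > 0 ∧ m > 0
  · by_cases hnm : n > m
    · have ih := tilingLoop_eq (n % m) m
      rw [tilingLoopB, dif_pos h, if_pos hnm,
        PySem.Int.floordiv_eq_ediv_of_pos h.2, PySem.Int.mod_eq_emod_of_pos h.2]
      rw [tilingLoopA_batch_left n m h.2 hnm, ih]
    · have ih := tilingLoop_eq n (m % n)
      rw [tilingLoopB, dif_pos h, if_neg hnm,
        PySem.Int.floordiv_eq_ediv_of_pos h.1, PySem.Int.mod_eq_emod_of_pos h.1]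
      rw [tilingLoopA_batch_right n m h.1 (by omega), ih]
  · rw [tilingLoopA_stop n m h, tilingLoopB]; simp [h]
termination_by (n + m).toNat
decreasing_by
  · have := Int.emod_lt_of_pos n (b := m) h.2
    have := Int.emod_nonneg n (by omega : m ≠ 0)
    omega
  · have := Int.emod_lt_of_pos m (b := n) h.1
    have := Int.emod_nonneg m (by omega : n ≠ 0)
    omega

-- ===== VERDICT (by name: the statement is the Claim_ definition above) =====
theorem tilingRectangle_spec : Claim_equal_tilingRectangle := by
  intro n m _
  unfold Spec_tilingRectangle tilingRectangle tilingRectangle_alt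
  by_cases h : n = m
  · simp [h]
  · simp [h, tilingLoop_eq]
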